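-- pv_equiv track=rewrite | github.com/Yatharth-Bhavsar/AuditX | auditx/owasp.py | get_owasp_coverage
-- ===== SOURCE A (Python) =====
-- def get_owasp_coverage(findings):
--     """Returns a PASS/FAIL coverage dict for OWASP categories based on findings."""
--     coverage = {
--         "A01: Broken Access Control": "PASS",
--         "A02: Cryptographic Failures": "PASS",
--         "A03: Injection": "PASS",
--         "A04: Insecure Design": "PASS",
--         "A05: Security Misconfiguration": "PASS",
--         "A06: Vulnerable Components": "PASS"
--     }
--
--     for f in findings:
--         owasp = f.get('owasp')
--         if owasp and owasp in coverage:
--             coverage[owasp] = "FAIL"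
--
--     return coverage
-- ===== SOURCE B (Python) =====
-- _CATEGORIES = [
--     "A01: Broken Access Control",
--     "A02: Cryptographic Failures",
--     "A03: Injection",
--     "A04: Insecure Design",
--     "A05: Security Misconfiguration",
--     "A06: Vulnerable Components",
-- ]
--
--
-- def get_owasp_coverage(findings):
--     """Returns a PASS/FAIL coverage dict for OWASP categories based on findings."""
--     return {
--         c: ("FAIL" if any(f.get('owasp') == c for f in findings) else "PASS")
--         for c in _CATEGORIES
--     }
-- ===== Notes on version B (the rewrite author's own statement) =====
-- stated objective: alternative
-- what changed: B inverts the loop nesting: instead of one stateful pass over findings that mutates a PASS-seeded dict, B iterates the fixed six-category list and for each category scans the findings with any(f.get('owasp') == c), building the result directly with no mutable state.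
import Mathlib
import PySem

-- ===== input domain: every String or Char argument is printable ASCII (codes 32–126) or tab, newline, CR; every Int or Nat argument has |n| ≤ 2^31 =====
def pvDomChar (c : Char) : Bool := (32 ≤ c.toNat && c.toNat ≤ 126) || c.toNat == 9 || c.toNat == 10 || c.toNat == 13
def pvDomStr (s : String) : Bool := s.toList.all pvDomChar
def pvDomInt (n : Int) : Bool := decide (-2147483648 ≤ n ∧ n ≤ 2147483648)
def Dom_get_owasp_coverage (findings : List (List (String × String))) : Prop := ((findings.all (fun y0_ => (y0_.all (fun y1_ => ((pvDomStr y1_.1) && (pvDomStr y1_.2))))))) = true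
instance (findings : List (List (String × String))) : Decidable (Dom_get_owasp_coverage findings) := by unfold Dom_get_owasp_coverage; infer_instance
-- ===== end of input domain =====

-- B inverts the loop nesting: a stateless per-category scan of the findings instead of
-- a stateful pass over findings mutating a PASS-seeded dict. (alternative)

-- shared helper: f.get('owasp') on the association list (first match, per the dict convention)
def pvGetOwasp (f : List (String × String)) : Option String :=
  (PySem.Dict.mk f).get? "owasp"

-- ===== PORT A =====
def pvCovInit : PySem.Dict String String :=
  PySem.Dict.ofList
    [("A01: Broken Access Control", "PASS"),
     ("A02: Cryptographic Failures", "PASS"),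
     ("A03: Injection", "PASS"),
     ("A04: Insecure Design", "PASS"),
     ("A05: Security Misconfiguration", "PASS"),
     ("A06: Vulnerable Components", "PASS")]

def pvStep (cov : PySem.Dict String String) (f : List (String × String)) :
    PySem.Dict String String :=
  match pvGetOwasp f with
  | some owasp => if owasp != "" && cov.contains owasp then cov.insert owasp "FAIL" else cov
  | none => cov

def get_owasp_coverage (findings : List (List (String × String))) : List (String × String) :=
  (findings.foldl pvStep pvCovInit).items

-- ===== PORT B =====
def pvCats : List String :=
  ["A01: Broken Access Control",
   "A02: Cryptographic Failures",
   "A03: Injection",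
   "A04: Insecure Design",
   "A05: Security Misconfiguration",
   "A06: Vulnerable Components"]

def get_owasp_coverage_alt (findings : List (List (String × String))) : List (String × String) :=
  pvCats.map (fun c =>
    (c, if findings.any (fun f => pvGetOwasp f == some c) then "FAIL" else "PASS"))

-- ===== PRECONDITION & SPEC =====
def Spec_get_owasp_coverage (findings : List (List (String × String))) (out : List (String × String)) : Prop := out = get_owasp_coverage_alt findings
instance (findings : List (List (String × String))) (out : List (String × String)) : Decidable (Spec_get_owasp_coverage findings out) := by unfold Spec_get_owasp_coverage; infer_instance

-- ===== CLAIM (what is proved, stated in full; the proofs are below) =====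
def Claim_equal_get_owasp_coverage : Prop := ∀ (findings : List (List (String × String))), Dom_get_owasp_coverage findings → Spec_get_owasp_coverage findings (get_owasp_coverage findings)

-- ===== LEMMAS AND PROOFS =====

lemma keys_pvStep (cov : PySem.Dict String String) (f : List (String × String)) :
    (pvStep cov f).keys = cov.keys := by
  unfold pvStep
  cases pvGetOwasp f with
  | none => rfl
  | some s =>
    simp only
    split_ifs with h
    · exact PySem.Dict.keys_insert_of_contains _ _ (by simpa using (Bool.and_elim_right h))
    · rfl

lemma keys_loop (fs : List (List (String × String))) (cov : PySem.Dict String String) :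
    (fs.foldl pvStep cov).keys = cov.keys := by
  induction fs generalizing cov with
  | nil => rfl
  | cons f rest ih => simpa [List.foldl_cons, keys_pvStep] using ih (pvStep cov f)

lemma contains_pvStep (cov : PySem.Dict String String) (f : List (String × String)) (c : String) :
    (pvStep cov f).contains c = cov.contains c := by
  rw [PySem.Dict.contains_eq_decide_mem_keys, PySem.Dict.contains_eq_decide_mem_keys,
    keys_pvStep]

lemma getD_loop (c : String) (dflt : String) (hc : c ≠ "")
    (fs : List (List (String × String))) (cov : PySem.Dict String String)
    (h : cov.contains c = true) :
    (fs.foldl pvStep cov).getD c dflt =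
      if fs.any (fun f => pvGetOwasp f == some c) then "FAIL" else cov.getD c dflt := by
  induction fs generalizing cov with
  | nil => simp
  | cons f rest ih =>
    have hstep : (pvStep cov f).contains c = true := by rw [contains_pvStep]; exact h
    rw [List.foldl_cons, ih (pvStep cov f) hstep, List.any_cons]
    cases hg : pvGetOwasp f with
    | none =>
      rw [show ((none : Option String) == some c) = false from rfl]
      simp only [Bool.false_or]
      have hsf : pvStep cov f = cov := by unfold pvStep; rw [hg]
      rw [hsf]
    | some s =>
      by_cases hsc : s = c
      · subst hsc
        rw [show (some s == some s) = true from by simp, Bool.true_or, if_pos rfl]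
        by_cases hrest : (rest.any fun f => pvGetOwasp f == some s) = true
        · rw [if_pos hrest]
        · rw [if_neg hrest]
          have hcond : (s != "" && cov.contains s) = true := by simp [h, hc]
          have hsf : pvStep cov f = cov.insert s "FAIL" := by
            unfold pvStep; rw [hg]; exact if_pos hcond
          rw [hsf, PySem.Dict.getD_insert_self]
      · rw [show (some s == some c) = false from by simp [hsc]]
        simp only [Bool.false_or]
        have hgd : (pvStep cov f).getD c dflt = cov.getD c dflt := by
          have hsf : pvStep cov f = if (s != "" && cov.contains s) = true then cov.insert s "FAIL" else cov := by
            unfold pvStep; rw [hg]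
          rw [hsf]
          split_ifs with hco
          · exact PySem.Dict.getD_insert_of_ne cov "FAIL" dflt (fun e => hsc e.symm)
          · rfl
        rw [hgd]

-- ===== VERDICT (by name: the statement is the Claim_ definition above) =====
theorem get_owasp_coverage_spec : Claim_equal_get_owasp_coverage := by
  intro findings _
  unfold Spec_get_owasp_coverage get_owasp_coverage get_owasp_coverage_alt
  have hkeys : (findings.foldl pvStep pvCovInit).keys = pvCats := by
    rw [keys_loop]; decide
  have hnd : (findings.foldl pvStep pvCovInit).keys.Nodup := by rw [hkeys]; decide
  rw [PySem.Dict.items_eq_map_keys _ hnd "PASS", hkeys]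
  apply List.map_congr_left
  intro c hcmem
  have hc : c ≠ "" := by
    fin_cases hcmem <;> decide
  have hcontains : pvCovInit.contains c = true := by
    fin_cases hcmem <;> decide
  have hinit : pvCovInit.getD c "PASS" = "PASS" := by
    fin_cases hcmem <;> decide
  rw [getD_loop c "PASS" hc findings pvCovInit hcontains, hinit]
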